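-- pv_equiv track=rewrite | github.com/g-1f/deepagents | libs/deepagents/deepagents/graph_no_middleware.py | _file_data_reducer
-- ===== SOURCE A (Python) =====
-- from typing import Annotated, Any, Literal, NotRequired, TypedDict
--
-- class FileData(TypedDict):
--     """File data structure."""
--
--     content: list[str]
--     created_at: str
--     modified_at: str
--
-- def _file_data_reducer(
--     left: dict[str, FileData] | None, right: dict[str, FileData | None]
-- ) -> dict[str, FileData]:
--     """Merge file updates with support for deletions."""
--     if left is None:
--         return {k: v for k, v in right.items() if v is not None}
--
--     result = {**left}
--     for key, value in right.items():
--         if value is None: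
--             result.pop(key, None)
--         else:
--             result[key] = value
--     return result
-- ===== SOURCE B (Python) =====
-- def _file_data_reducer(left, right):
--     """Merge file updates with support for deletions."""
--     base = left or {}
--     # surviving left entries, with right's value where right overrides
--     merged = {k: w for k, v in base.items() if (w := right.get(k, v)) is not None}
--     # brand-new entries introduced by right
--     new = {k: v for k, v in right.items() if v is not None and k not in base}
--     return {**merged, **new}
-- ===== Notes on version B (the rewrite author's own statement) =====
-- stated objective: alternative
-- what changed: A copies left and mutates the copy in one interleaved loop over right (pop on None, assign otherwise); B performs no mutation at all: it rebuilds the result functionally as a comprehension over left's entries where a right.get(k, v) lookup decides keep/override/drop, plus a second comprehension over right collecting only brand-new non-None keys, combined with one bulk merge.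
import Mathlib
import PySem

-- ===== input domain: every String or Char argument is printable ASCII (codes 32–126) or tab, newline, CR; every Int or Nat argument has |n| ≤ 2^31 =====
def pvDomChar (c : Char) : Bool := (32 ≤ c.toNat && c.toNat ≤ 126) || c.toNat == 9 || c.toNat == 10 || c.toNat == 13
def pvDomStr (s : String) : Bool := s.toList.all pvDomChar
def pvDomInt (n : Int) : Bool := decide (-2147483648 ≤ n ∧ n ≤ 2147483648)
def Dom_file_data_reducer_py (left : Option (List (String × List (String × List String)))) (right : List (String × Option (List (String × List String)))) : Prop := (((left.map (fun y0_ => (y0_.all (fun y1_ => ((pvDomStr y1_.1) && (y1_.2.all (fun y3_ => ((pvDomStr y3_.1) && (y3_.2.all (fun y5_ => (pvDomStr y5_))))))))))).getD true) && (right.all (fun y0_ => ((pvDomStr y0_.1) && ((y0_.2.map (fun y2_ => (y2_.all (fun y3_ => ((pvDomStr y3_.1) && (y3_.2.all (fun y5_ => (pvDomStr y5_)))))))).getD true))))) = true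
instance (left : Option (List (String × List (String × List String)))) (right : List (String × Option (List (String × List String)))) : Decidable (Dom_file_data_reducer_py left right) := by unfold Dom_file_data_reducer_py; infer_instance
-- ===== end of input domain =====

-- B replaces A's copy-and-mutate loop (pop/assign over right) by a mutation-free functional rebuild:
-- a lookup-driven comprehension over left's entries plus a comprehension over right's brand-new keys
-- (objective: alternative algorithm, no mutation).

abbrev pvFD : Type := List (String × List String)

-- ===== PORT A =====
-- body of the comprehension {k: v for k, v in right.items() if v is not None}
def pvCompStep (d : PySem.Dict String pvFD) (kv : String × Option pvFD) : PySem.Dict String pvFD :=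
  match kv.2 with
  | none => d
  | some v => d.insert kv.1 v

-- body of A's loop: result.pop(key, None) / result[key] = value
def pvPopOrSetStep (d : PySem.Dict String pvFD) (kv : String × Option pvFD) : PySem.Dict String pvFD :=
  match kv.2 with
  | none => d.erase kv.1
  | some v => d.insert kv.1 v

-- one {**…} insertion
def pvMergeStep (d : PySem.Dict String pvFD) (kv : String × pvFD) : PySem.Dict String pvFD :=
  d.insert kv.1 kv.2

-- literal transliteration of _file_data_reducer
def file_data_reducer_py (left : Option (List (String × List (String × List String)))) (right : List (String × Option (List (String × List String)))) : List (String × List (String × List String)) :=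
  match left with
  | none =>
      -- {k: v for k, v in right.items() if v is not None}
      (right.foldl pvCompStep PySem.Dict.empty).items
  | some l =>
      -- result = {**left}
      let result := l.foldl pvMergeStep PySem.Dict.empty
      -- for key, value in right.items(): pop / assign
      (right.foldl pvPopOrSetStep result).items

-- ===== PORT B =====
-- body of B's first comprehension: k: w  for k, v in base.items()  if (w := right.get(k, v)) is not None
def pvKeepStep (right : List (String × Option pvFD)) (d : PySem.Dict String pvFD) (kv : String × pvFD) : PySem.Dict String pvFD :=
  match (PySem.Dict.mk right).getD kv.1 (some kv.2) with
  | none => d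
  | some w => d.insert kv.1 w

-- body of B's second comprehension: k: v  for k, v in right.items()  if v is not None and k not in base
def pvNewStep (base : PySem.Dict String pvFD) (d : PySem.Dict String pvFD) (kv : String × Option pvFD) : PySem.Dict String pvFD :=
  match kv.2 with
  | none => d
  | some v => if base.contains kv.1 then d else d.insert kv.1 v

-- literal transliteration of Source B: base = left or {}; two comprehensions; one bulk merge
def file_data_reducer_py_alt (left : Option (List (String × List (String × List String)))) (right : List (String × Option (List (String × List String)))) : List (String × List (String × List String)) :=
  let base : PySem.Dict String pvFD := PySem.Dict.mk (left.getD [])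
  let merged := base.items.foldl (pvKeepStep right) PySem.Dict.empty
  let newd := right.foldl (pvNewStep base) PySem.Dict.empty
  -- {**merged, **new}
  (newd.items.foldl pvMergeStep merged).items

-- ===== PRECONDITION & SPEC =====
-- Pre_ excludes association lists whose keys repeat (in left or in right): the Python arguments are
-- dicts, which can never hold duplicate keys, so such lists are artifacts of the list representation.
def Pre_file_data_reducer_py (left : Option (List (String × List (String × List String)))) (right : List (String × Option (List (String × List String)))) : Prop :=
  ((left.getD []).map Prod.fst).Nodup ∧ (right.map Prod.fst).Nodup
instance (left : Option (List (String × List (String × List String)))) (right : List (String × Option (List (String × List String)))) : Decidable (Pre_file_data_reducer_py left right) := by unfold Pre_file_data_reducer_py; infer_instance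

def pvWitness_file_data_reducer_py : (Option (List (String × List (String × List String)))) × (List (String × Option (List (String × List String)))) :=
  (some [("a.txt", [("content", ["x"])]), ("b.txt", [("content", ["y"])])],
   [("a.txt", none), ("c.txt", some [("content", ["z"])])])

def Spec_file_data_reducer_py (left : Option (List (String × List (String × List String)))) (right : List (String × Option (List (String × List String)))) (out : List (String × List (String × List String))) : Prop := out = file_data_reducer_py_alt left right
instance (left : Option (List (String × List (String × List String)))) (right : List (String × Option (List (String × List String)))) (out : List (String × List (String × List String))) : Decidable (Spec_file_data_reducer_py left right out) := by unfold Spec_file_data_reducer_py; infer_instance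

-- ===== CLAIM (what is proved, stated in full; the proofs are below) =====
def Claim_equal_file_data_reducer_py : Prop := ∀ (left : Option (List (String × List (String × List String)))) (right : List (String × Option (List (String × List String)))), Dom_file_data_reducer_py left right → Pre_file_data_reducer_py left right → Spec_file_data_reducer_py left right (file_data_reducer_py left right)

-- ===== LEMMAS AND PROOFS =====

-- the value B's lookup assigns to a surviving left entry (k, v): none = dropped
def pvG (r : List (String × Option pvFD)) (kv : String × pvFD) : Option (String × pvFD) :=
  match (PySem.Dict.mk r).getD kv.1 (some kv.2) with
  | none => none
  | some w => some (kv.1, w)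

-- a right entry that creates a brand-new key (keys ks already present are skipped)
def pvH (ks : List String) (kv : String × Option pvFD) : Option (String × pvFD) :=
  match kv.2 with
  | none => none
  | some w => if kv.1 ∈ ks then none else some (kv.1, w)

theorem pvG_nil (kv : String × pvFD) : pvG [] kv = some (kv.1, kv.2) := by
  simp [pvG, PySem.Dict.getD, PySem.Dict.get?]

theorem pvG_cons_eq (k : String) (ov : Option pvFD) (rest : List (String × Option pvFD))
    (kv : String × pvFD) (h : kv.1 = k) :
    pvG ((k, ov) :: rest) kv = (match ov with | none => none | some w => some (kv.1, w)) := by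
  subst h
  cases ov <;> simp [pvG, PySem.Dict.getD_eq_get?_getD, PySem.Dict.get?_mk_cons]

theorem pvG_cons_ne (k : String) (ov : Option pvFD) (rest : List (String × Option pvFD))
    (kv : String × pvFD) (h : kv.1 ≠ k) :
    pvG ((k, ov) :: rest) kv = pvG rest kv := by
  have : (k == kv.1) = false := beq_eq_false_iff_ne.mpr (Ne.symm h)
  simp [pvG, PySem.Dict.getD_eq_get?_getD, PySem.Dict.get?_mk_cons, this]

-- a fold whose step inserts f a (when some) is the pvMergeStep fold of the filterMap
theorem pv_foldl_optInsert {alpha : Type} (f : alpha → Option (String × pvFD)) (l : List alpha)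
    (step : PySem.Dict String pvFD → alpha → PySem.Dict String pvFD)
    (hstep : ∀ d a, step d a = match f a with | none => d | some kw => d.insert kw.1 kw.2) :
    ∀ d : PySem.Dict String pvFD,
      l.foldl step d = (l.filterMap f).foldl pvMergeStep d := by
  induction l with
  | nil => intro d; simp
  | cons a rest ih =>
      intro d
      rw [List.foldl_cons, List.filterMap_cons, hstep d a]
      cases hfa : f a with
      | none => exact ih d
      | some kw => simp only [List.foldl_cons, pvMergeStep]; exact ih _

-- keys of a filterMap whose some-results keep the key are a sublist of the original keys
theorem pv_keys_filterMap_sublist {alpha : Type} (f : alpha → Option (String × pvFD))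
    (key : alpha → String) (hf : ∀ a b, f a = some b → b.1 = key a) (l : List alpha) :
    ((l.filterMap f).map Prod.fst).Sublist (l.map key) := by
  induction l with
  | nil => simp
  | cons a rest ih =>
      rw [List.filterMap_cons]
      cases hfa : f a with
      | none =>
          simp only [List.map_cons]
          exact ih.cons _
      | some b =>
          rw [List.map_cons, List.map_cons, hf a b hfa]
          exact ih.cons₂ _

theorem pvG_key (r : List (String × Option pvFD)) (a : String × pvFD) (b : String × pvFD)
    (h : pvG r a = some b) : b.1 = a.1 := by
  unfold pvG at h
  cases hk : (PySem.Dict.mk r).getD a.1 (some a.2) with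
  | none => rw [hk] at h; exact absurd h (by simp)
  | some w => rw [hk] at h; cases h; rfl

theorem pvH_key (ks : List String) (a : String × Option pvFD) (b : String × pvFD)
    (h : pvH ks a = some b) : b.1 = a.1 := by
  obtain ⟨k0, ov⟩ := a
  cases ov with
  | none => exact absurd h (by simp [pvH])
  | some w =>
      by_cases hm : k0 ∈ ks
      · simp [pvH, hm] at h
      · simp only [pvH, if_neg hm] at h
        cases h; rfl

theorem pvH_key_not_mem (ks : List String) (a : String × Option pvFD) (b : String × pvFD)
    (h : pvH ks a = some b) : b.1 ∉ ks := by
  obtain ⟨k0, ov⟩ := a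
  cases ov with
  | none => exact absurd h (by simp [pvH])
  | some w =>
      by_cases hm : k0 ∈ ks
      · simp [pvH, hm] at h
      · simp only [pvH, if_neg hm] at h
        cases h; exact hm

-- pvH only looks at membership of the key in ks
theorem pvH_congr (ks ks' : List String) (kv : String × Option pvFD)
    (h : kv.1 ∈ ks ↔ kv.1 ∈ ks') : pvH ks kv = pvH ks' kv := by
  obtain ⟨k0, ov⟩ := kv
  cases ov with
  | none => rfl
  | some w =>
      simp only [pvH]
      by_cases hm : k0 ∈ ks
      · rw [if_pos hm, if_pos (h.mp hm)]
      · rw [if_neg hm, if_neg (fun hx => hm (h.mpr hx))]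

-- guarded filterMap drops exactly the filtered-out elements
theorem pv_filterMap_guard {alpha beta : Type} (p : alpha → Bool) (f : alpha → Option beta)
    (l : List alpha) :
    l.filterMap (fun a => if p a then none else f a)
      = (l.filter (fun a => !p a)).filterMap f := by
  induction l with
  | nil => simp
  | cons a rest ih =>
      by_cases hp : p a = true
      · simp [hp, ih]
      · simp only [Bool.not_eq_true] at hp
        simp [List.filterMap_cons, hp, ih]

-- characterisation of A's interleaved loop, for any start dict with unique keys
theorem pv_A_char (r : List (String × Option pvFD)) (hr : (r.map Prod.fst).Nodup) :
    ∀ d : PySem.Dict String pvFD, d.keys.Nodup →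
      (r.foldl pvPopOrSetStep d).items
        = d.items.filterMap (pvG r) ++ r.filterMap (pvH d.keys) := by
  induction r with
  | nil =>
      intro d _
      simp [List.filterMap_congr (fun kv _ => pvG_nil kv)]
  | cons kv rest ih =>
      intro d hd
      obtain ⟨k, ov⟩ := kv
      simp only [List.map_cons, List.nodup_cons] at hr
      have hknR : k ∉ rest.map Prod.fst := hr.1
      cases ov with
      | some w =>
          simp only [List.foldl_cons, pvPopOrSetStep]
          by_cases hc : d.contains k = true
          · -- overwrite in place
            have hkeys : (d.insert k w).keys = d.keys := PySem.Dict.keys_insert_of_contains d w hc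
            rw [ih hr.2 (d.insert k w) (hkeys ▸ hd)]
            rw [PySem.Dict.items_insert_of_contains d w hc, hkeys]
            rw [List.filterMap_map, List.filterMap_cons]
            have hfirst : pvH d.keys (k, some w) = none := by
              have : k ∈ d.keys := (PySem.Dict.contains_iff_mem_keys d k).mp hc
              simp [pvH, this]
            rw [hfirst]
            congr 1
            apply List.filterMap_congr
            intro p _
            by_cases hp : p.1 = k
            · have hb : (p.1 == k) = true := by simp [hp]
              simp only [Function.comp, hb, if_pos]
              rw [pvG_cons_eq k (some w) rest p hp]
              have : pvG rest (k, w) = some (k, w) := by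
                unfold pvG
                have hget : (PySem.Dict.mk rest).get? k = none := by
                  rw [PySem.Dict.get?_eq_none_iff_not_mem_keys]
                  simpa [PySem.Dict.keys] using hknR
                simp [PySem.Dict.getD_eq_get?_getD, hget]
              simp [this, hp]
            · have hb : (p.1 == k) = false := by simp [hp]
              simp only [Function.comp, hb, if_neg, Bool.false_eq_true, not_false_iff]
              exact (pvG_cons_ne k (some w) rest p hp).symm
          · -- a fresh key: appended
            have hc' : d.contains k = false := by simpa using hc
            have hkeys : (d.insert k w).keys = d.keys ++ [k] :=
              PySem.Dict.keys_insert_of_not_contains d w hc'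
            have hnd' : (d.insert k w).keys.Nodup := PySem.Dict.nodup_keys_insert d k w hd
            have hkmem : k ∉ d.keys := fun hm =>
              (by simp [hc'] : ¬ d.contains k = true) ((PySem.Dict.contains_iff_mem_keys d k).mpr hm)
            rw [ih hr.2 (d.insert k w) hnd']
            rw [PySem.Dict.items_insert_of_not_contains d w hc', hkeys]
            rw [List.filterMap_append, List.filterMap_cons]
            have hdkeysne : ∀ p : String × pvFD, p ∈ d.items → p.1 ≠ k := by
              intro p hp he
              exact hkmem (he ▸ List.mem_map_of_mem hp)
            have h1 : d.items.filterMap (pvG rest) = d.items.filterMap (pvG ((k, some w) :: rest)) :=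
              List.filterMap_congr (fun p hp => (pvG_cons_ne k (some w) rest p (hdkeysne p hp)).symm)
            have hGkw : pvG rest (k, w) = some (k, w) := by
              unfold pvG
              have hget : (PySem.Dict.mk rest).get? k = none := by
                rw [PySem.Dict.get?_eq_none_iff_not_mem_keys]
                simpa [PySem.Dict.keys] using hknR
              simp [PySem.Dict.getD_eq_get?_getD, hget]
            have h3 : rest.filterMap (pvH (d.keys ++ [k])) = rest.filterMap (pvH d.keys) := by
              apply List.filterMap_congr
              intro q hq
              have hqk : q.1 ≠ k := fun he => hknR (he ▸ List.mem_map_of_mem hq)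
              exact pvH_congr _ _ q (by simp [hqk])
            have hfirst : pvH d.keys (k, some w) = some (k, w) := by simp [pvH, hkmem]
            rw [h1, h3, List.filterMap_cons, hfirst, hGkw]
            simp
      | none =>
          simp only [List.foldl_cons, pvPopOrSetStep]
          have hitems : (d.erase k).items = d.items.filter (fun p => !(p.1 == k)) := rfl
          have hkeys : (d.erase k).keys = d.keys.filter (fun s => !(s == k)) := by
            simp only [PySem.Dict.keys, hitems, List.filter_map]
            rfl
          have hnd' : (d.erase k).keys.Nodup := by rw [hkeys]; exact hd.filter _
          rw [ih hr.2 (d.erase k) hnd', hitems, hkeys]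
          rw [List.filterMap_cons]
          have hfirst : pvH d.keys (k, none) = none := rfl
          rw [hfirst]
          have h1 : d.items.filterMap (pvG ((k, none) :: rest))
              = (d.items.filter (fun p => !(p.1 == k))).filterMap (pvG rest) := by
            have he : ∀ p : String × pvFD,
                pvG ((k, none) :: rest) p = if (p.1 == k) then none else pvG rest p := by
              intro p
              by_cases hp : p.1 = k
              · have hb : (p.1 == k) = true := by simp [hp]
                rw [hb]
                simp only [if_pos]
                exact pvG_cons_eq k none rest p hp
              · have hb : (p.1 == k) = false := by simp [hp]
                rw [hb]
                simp only [Bool.false_eq_true, if_neg, not_false_iff]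
                exact pvG_cons_ne k none rest p hp
            rw [List.filterMap_congr (fun p _ => he p)]
            exact pv_filterMap_guard (fun p => p.1 == k) (pvG rest) d.items
          have h3 : rest.filterMap (pvH (d.keys.filter (fun s => !(s == k))))
              = rest.filterMap (pvH d.keys) := by
            apply List.filterMap_congr
            intro q hq
            have hqk : q.1 ≠ k := fun he => hr.1 (he ▸ List.mem_map_of_mem hq)
            apply pvH_congr
            constructor
            · intro hm; exact (List.mem_filter.mp hm).1
            · intro hm; exact List.mem_filter.mpr ⟨hm, by simp [hqk]⟩
          rw [h1, h3]

-- a pvMergeStep fold over fresh distinct keys starting from empty lists exactly its input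
theorem pv_foldl_merge_items (l : List (String × pvFD)) (h : (l.map Prod.fst).Nodup) :
    (l.foldl pvMergeStep PySem.Dict.empty).items = l := by
  have hms : (pvMergeStep : PySem.Dict String pvFD → String × pvFD → PySem.Dict String pvFD)
      = fun d kv => d.insert kv.1 kv.2 := rfl
  rw [hms]
  have := PySem.Dict.items_foldl_insert_fresh (l := l) (k := Prod.fst) (v := Prod.snd)
    (d := (PySem.Dict.empty : PySem.Dict String pvFD))
    (by intro a _; simp [PySem.Dict.contains_empty]) h
  simpa [PySem.Dict.empty] using this

-- B's first comprehension is the pvG filterMap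
theorem pv_keep_eq (r : List (String × Option pvFD)) (bs : List (String × pvFD))
    (d : PySem.Dict String pvFD) :
    bs.foldl (pvKeepStep r) d = (bs.filterMap (pvG r)).foldl pvMergeStep d := by
  apply pv_foldl_optInsert (pvG r) bs (pvKeepStep r) _ d
  intro d' a
  unfold pvKeepStep pvG
  cases (PySem.Dict.mk r).getD a.1 (some a.2) <;> rfl

-- B's second comprehension is the pvH filterMap
theorem pv_new_eq (base : PySem.Dict String pvFD) (r : List (String × Option pvFD))
    (d : PySem.Dict String pvFD) :
    r.foldl (pvNewStep base) d = (r.filterMap (pvH base.keys)).foldl pvMergeStep d := by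
  apply pv_foldl_optInsert (pvH base.keys) r (pvNewStep base) _ d
  intro d' a
  unfold pvNewStep pvH
  cases a.2 with
  | none => rfl
  | some v =>
      simp only
      by_cases hm : a.1 ∈ base.keys
      · rw [if_pos ((PySem.Dict.contains_iff_mem_keys base a.1).mpr hm), if_pos hm]
      · rw [if_neg (fun hc => hm ((PySem.Dict.contains_iff_mem_keys base a.1).mp hc)), if_neg hm]

-- B computes pvG-survivors of left followed by pvH-new entries of right
theorem pv_B_char (left : Option (List (String × List (String × List String))))
    (right : List (String × Option (List (String × List String))))
    (hl : ((left.getD []).map Prod.fst).Nodup) (hr : (right.map Prod.fst).Nodup) :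
    file_data_reducer_py_alt left right
      = (left.getD []).filterMap (pvG right)
        ++ right.filterMap (pvH ((left.getD []).map Prod.fst)) := by
  unfold file_data_reducer_py_alt
  set l := left.getD [] with hldef
  have hkeysmk : (PySem.Dict.mk l : PySem.Dict String pvFD).keys = l.map Prod.fst := by
    simp [PySem.Dict.keys]
  dsimp only
  rw [pv_keep_eq right l PySem.Dict.empty]
  have hGnd : ((l.filterMap (pvG right)).map Prod.fst).Nodup :=
    (pv_keys_filterMap_sublist (pvG right) Prod.fst (pvG_key right) l).nodup hl
  have hmerged : ((l.filterMap (pvG right)).foldl pvMergeStep PySem.Dict.empty).items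
      = l.filterMap (pvG right) := pv_foldl_merge_items _ hGnd
  rw [pv_new_eq (PySem.Dict.mk l) right PySem.Dict.empty, hkeysmk]
  have hHnd : ((right.filterMap (pvH (l.map Prod.fst))).map Prod.fst).Nodup :=
    (pv_keys_filterMap_sublist (pvH (l.map Prod.fst)) Prod.fst
      (pvH_key (l.map Prod.fst)) right).nodup hr
  have hnewd : ((right.filterMap (pvH (l.map Prod.fst))).foldl pvMergeStep PySem.Dict.empty).items
      = right.filterMap (pvH (l.map Prod.fst)) := pv_foldl_merge_items _ hHnd
  -- the bulk merge appends: every new key is absent from merged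
  set M := (l.filterMap (pvG right)).foldl pvMergeStep PySem.Dict.empty with hM
  set N := right.filterMap (pvH (l.map Prod.fst)) with hN
  have hfresh : ∀ a ∈ (((N.foldl pvMergeStep PySem.Dict.empty).items : List (String × pvFD))),
      M.contains a.1 = false := by
    intro a ha
    rw [hnewd] at ha
    obtain ⟨x, hx, hxa⟩ := List.mem_filterMap.mp ha
    have hnot : a.1 ∉ l.map Prod.fst := pvH_key_not_mem _ x a hxa
    have : a.1 ∉ M.keys := by
      intro hmem
      apply hnot
      have hsub := pv_keys_filterMap_sublist (pvG right) Prod.fst (pvG_key right) l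
      simp only [PySem.Dict.keys] at hmem
      rw [hmerged] at hmem
      exact hsub.mem hmem
    cases hc : M.contains a.1 with
    | false => rfl
    | true => exact absurd ((PySem.Dict.contains_iff_mem_keys M a.1).mp hc) this
  have hNnd : (((N.foldl pvMergeStep PySem.Dict.empty).items).map Prod.fst).Nodup := by
    rw [hnewd]; exact hHnd
  have hfinal := PySem.Dict.items_foldl_insert_fresh
    (l := (N.foldl pvMergeStep PySem.Dict.empty).items) (k := Prod.fst) (v := Prod.snd) (d := M)
    hfresh hNnd
  have hconv : List.foldl pvMergeStep M ((N.foldl pvMergeStep PySem.Dict.empty).items)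
      = List.foldl (fun (d : PySem.Dict String pvFD) (a : String × pvFD) => d.insert a.1 a.2) M
          ((N.foldl pvMergeStep PySem.Dict.empty).items) := rfl
  rw [hconv, hfinal, hmerged, hnewd]
  simp

-- ===== VERDICT (by name: the statement is the Claim_ definition above) =====
theorem file_data_reducer_py_spec : Claim_equal_file_data_reducer_py := by
  intro left right _ hpre
  obtain ⟨hl, hr⟩ := hpre
  show file_data_reducer_py left right = file_data_reducer_py_alt left right
  rw [pv_B_char left right hl hr]
  cases left with
  | none =>
      unfold file_data_reducer_py
      simp only [Option.getD_none, List.filterMap_nil, List.nil_append, List.map_nil]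
      rw [pv_foldl_optInsert (pvH []) right pvCompStep ?hstep PySem.Dict.empty]
      case hstep =>
        intro d a
        unfold pvCompStep pvH
        cases a.2 <;> simp
      apply pv_foldl_merge_items
      exact (pv_keys_filterMap_sublist (pvH []) Prod.fst (pvH_key []) right).nodup hr
  | some l =>
      unfold file_data_reducer_py
      simp only [Option.getD_some] at hl ⊢
      have hbase : l.foldl pvMergeStep PySem.Dict.empty = PySem.Dict.mk l := by
        apply PySem.Dict.ext
        rw [pv_foldl_merge_items l hl]
      rw [hbase]
      have hkeysmk : (PySem.Dict.mk l : PySem.Dict String pvFD).keys = l.map Prod.fst := by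
        simp [PySem.Dict.keys]
      have := pv_A_char right hr (PySem.Dict.mk l) (by rw [hkeysmk]; exact hl)
      rw [this, hkeysmk]
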